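-- pv_equiv track=rewrite | github.com/obenaini/my-a3 | club_functions.py | get_last_to_first
-- ===== SOURCE A (Python) =====
-- from typing import List, Tuple, Dict, TextIO
--
-- def get_last_to_first(
--         person_to_friends: Dict[str, List[str]]) -> Dict[str, List[str]]:
--     """Return a "last name to first name(s)" dictionary with the people from the
--     "person to friends" dictionary person_to_friends.
--
--     >>> get_last_to_first(P2F) == {
--     ...    'Katsopolis': ['Jesse'],
--     ...    'Tanner': ['Danny R', 'Michelle', 'Stephanie J'],
--     ...    'Gladstone': ['Joey'],
--     ...    'Donaldson-Katsopolis': ['Rebecca'],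
--     ...    'Gibbler': ['Kimmy'],
--     ...    'Tanner-Fuller': ['DJ']}
--     True
--     """
--     d = {}
--     for key in person_to_friends.keys():
--         index = key.index(" ")
--         if " " in key[index + 1:]:
--             index = key.index(" ", index + 1)
--         k_last, k_first = key[index + 1:], key[:index]
--         if k_last not in d.keys():
--             d.setdefault(k_last, [k_first])
--         elif k_last in d.keys() and k_first not in d[k_last]:
--             d.setdefault(k_last, d[k_last]).append(k_first)
--     for value in person_to_friends.values():
--         for person in value:
--             index = person.index(" ")
--             if " " in person[index + 1:]:
--                 index = person.index(" ", index + 1)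
--             v_last, v_first = person[index + 1:], person[:index]
--             if v_last not in d.keys():
--                 d.setdefault(v_last, [v_first])
--             elif v_last in d.keys() and v_first not in d[v_last]:
--                 d.setdefault(v_last, d[v_last]).append(v_first)
--     for keys, values in d.items():
--         d[keys] = sorted(values)
--     return d
-- ===== SOURCE B (Python) =====
-- def _split_name(name):
--     i = name.index(" ")
--     j = name.find(" ", i + 1)
--     cut = i if j == -1 else j
--     return name[cut + 1:], name[:cut]
--
--
-- def get_last_to_first(person_to_friends):
--     names = list(person_to_friends)
--     for friends in person_to_friends.values():
--         names += friends
--     pairs = [_split_name(n) for n in names]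
--     return {last: sorted({first for l, first in pairs if l == last})
--             for last in dict.fromkeys(l for l, _ in pairs)}
-- ===== Notes on version B (the rewrite author's own statement) =====
-- stated objective: alternative
-- what changed: A grows a dict incrementally with dedup-on-insert (a list-membership test per name) and then re-sorts every value in a third pass; B uses no grouping dict at all: it precomputes the (last, first) pair list once, takes the distinct last names in first-occurrence order, and builds each value by a per-key filter over the pair list, sorted as a set.
import Mathlib
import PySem

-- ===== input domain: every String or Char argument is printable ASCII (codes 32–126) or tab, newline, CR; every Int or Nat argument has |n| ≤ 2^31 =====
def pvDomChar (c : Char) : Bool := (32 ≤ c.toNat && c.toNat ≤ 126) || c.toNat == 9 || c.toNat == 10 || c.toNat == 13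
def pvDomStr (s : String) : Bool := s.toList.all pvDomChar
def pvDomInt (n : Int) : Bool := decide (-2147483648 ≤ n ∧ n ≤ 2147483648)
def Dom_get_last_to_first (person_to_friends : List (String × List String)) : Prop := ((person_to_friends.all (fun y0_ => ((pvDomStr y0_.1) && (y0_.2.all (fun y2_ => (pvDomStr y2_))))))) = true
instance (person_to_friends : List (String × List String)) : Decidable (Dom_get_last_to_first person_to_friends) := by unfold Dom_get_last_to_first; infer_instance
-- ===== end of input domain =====

-- B drops A's incremental dedup-on-insert dict entirely: it precomputes the (last, first)
-- pair list once, takes the distinct last names in first-occurrence order, and builds each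
-- value by a per-key filter over the pair list, sorted as a set ("alternative").

-- ===== PORT A =====
def get_last_to_first (person_to_friends : List (String × List String)) : List (String × List String) :=
  let d : PySem.Dict String (List String) := PySem.Dict.empty
  let d := person_to_friends.foldl (fun d kv =>
    let key := kv.1
    let index := PySem.Str.find key " "
    let index := if PySem.Str.isIn " " (PySem.Str.slice key (some (index + 1)) none) then
        PySem.Str.findFrom key " " (index + 1) none else index
    let k_last := PySem.Str.slice key (some (index + 1)) none
    let k_first := PySem.Str.slice key none (some index)
    if d.contains k_last = false then d.insert k_last [k_first]
    else if d.contains k_last && !((d.getD k_last []).contains k_first) then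
      d.modify k_last [] (fun l => l ++ [k_first])
    else d) d
  let d := person_to_friends.foldl (fun d kv =>
    kv.2.foldl (fun d person =>
      let index := PySem.Str.find person " "
      let index := if PySem.Str.isIn " " (PySem.Str.slice person (some (index + 1)) none) then
          PySem.Str.findFrom person " " (index + 1) none else index
      let v_last := PySem.Str.slice person (some (index + 1)) none
      let v_first := PySem.Str.slice person none (some index)
      if d.contains v_last = false then d.insert v_last [v_first]
      else if d.contains v_last && !((d.getD v_last []).contains v_first) then
        d.modify v_last [] (fun l => l ++ [v_first])
      else d) d) d
  d.items.map (fun kv => (kv.1, PySem.List.sorted kv.2 (fun x => x) false))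

-- ===== PORT B =====
def pvSplitName (name : String) : String × String :=
  let i := PySem.Str.find name " "
  let j := PySem.Str.findFrom name " " (i + 1) none
  let cut := if j == -1 then i else j
  (PySem.Str.slice name (some (cut + 1)) none, PySem.Str.slice name none (some cut))

def get_last_to_first_alt (person_to_friends : List (String × List String)) : List (String × List String) :=
  let names := person_to_friends.foldl (fun ns kv => ns ++ kv.2) (person_to_friends.map (fun kv => kv.1))
  let pairs := names.map pvSplitName
  (PySem.Set.ofList (pairs.map (fun p => p.1))).map (fun last =>
    (last, PySem.List.sorted
      (PySem.Set.ofList ((pairs.filter (fun p => p.1 == last)).map (fun p => p.2)))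
      (fun x => x) false))

-- ===== PRECONDITION & SPEC =====
-- Pre_ excludes exactly the inputs on which Python A raises ValueError: a name (key or friend) containing no space.
def Pre_get_last_to_first (person_to_friends : List (String × List String)) : Prop :=
  (person_to_friends.all (fun kv =>
    PySem.Str.isIn " " kv.1 && kv.2.all (fun p => PySem.Str.isIn " " p))) = true
instance (person_to_friends : List (String × List String)) : Decidable (Pre_get_last_to_first person_to_friends) := by unfold Pre_get_last_to_first; infer_instance

def pvWitness_get_last_to_first : (List (String × List String)) :=
  [("Ann Bell", ["Cal Dole", "Eve F Gray"]), ("Hal Bell", [])]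

def Spec_get_last_to_first (person_to_friends : List (String × List String)) (out : List (String × List String)) : Prop := out = get_last_to_first_alt person_to_friends
instance (person_to_friends : List (String × List String)) (out : List (String × List String)) : Decidable (Spec_get_last_to_first person_to_friends out) := by unfold Spec_get_last_to_first; infer_instance

-- ===== CLAIM (what is proved, stated in full; the proofs are below) =====
def Claim_equal_get_last_to_first : Prop := ∀ (person_to_friends : List (String × List String)), Dom_get_last_to_first person_to_friends → Pre_get_last_to_first person_to_friends → Spec_get_last_to_first person_to_friends (get_last_to_first person_to_friends)

-- ===== LEMMAS AND PROOFS =====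

-- A's condition '" " in key[index+1:]' holds iff B's find-from-second-position is not -1.
theorem pv_isIn_iff (s : String) :
    PySem.Str.isIn " " (PySem.Str.slice s (some (PySem.Str.find s " " + 1)) none) = true ↔
    PySem.Str.findFrom s " " (PySem.Str.find s " " + 1) none ≠ -1 := by
  have hsp : (" " : String).toList = [' '] := rfl
  have hneg1 := PySem.Chars.neg_one_le_find s.toList [' ']
  obtain ⟨k, hk, hcast⟩ : ∃ k : Nat, k ≤ s.toList.length ∧ PySem.Chars.find s.toList [' '] + 1 = (k : Int) := by
    rcases Int.lt_or_le (PySem.Chars.find s.toList [' ']) 0 with hneg | hpos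
    · exact ⟨0, Nat.zero_le _, by omega⟩
    · refine ⟨(PySem.Chars.find s.toList [' ']).toNat + 1, ?_, by omega⟩
      have hpre := (PySem.Chars.find_spec hpos).1
      have hlen := hpre.length_le
      rw [List.length_drop] at hlen
      have h1 : ([' '] : List Char).length = 1 := rfl
      omega
  have hfind : PySem.Str.find s " " = PySem.Chars.find s.toList [' '] := by
    rw [PySem.Str.find_eq, hsp]
  rw [hfind, hcast]
  have hiff := PySem.Chars.findFrom_natCast_eq_neg_one_iff s.toList [' '] k hk
  have hslice : (PySem.Str.slice s (some ((k : Int))) none).toList = s.toList.drop k := by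
    simp [PySem.Str.toList_slice, PySem.List.slice_from_natCast]
  rw [PySem.Str.isIn_iff_infix, hslice, hsp]
  have hff : PySem.Str.findFrom s " " ((k : Int)) none = PySem.Chars.findFrom s.toList [' '] ((k : Int)) none := by
    rw [PySem.Str.findFrom_eq, hsp]
  rw [hff]
  constructor
  · intro h hc
    exact (hiff.mp hc) h
  · intro h
    by_contra hno
    exact h (hiff.mpr hno)

-- A's two-step "first space, then the second space if any" index equals B's cut.
theorem pv_cut_eq (s : String) :
    (if PySem.Str.isIn " " (PySem.Str.slice s (some (PySem.Str.find s " " + 1)) none) then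
        PySem.Str.findFrom s " " (PySem.Str.find s " " + 1) none
      else PySem.Str.find s " ") =
    (if PySem.Str.findFrom s " " (PySem.Str.find s " " + 1) none == -1 then
        PySem.Str.find s " "
      else PySem.Str.findFrom s " " (PySem.Str.find s " " + 1) none) := by
  by_cases h : PySem.Str.findFrom s " " (PySem.Str.find s " " + 1) none = -1
  · rw [if_neg (fun hc => (pv_isIn_iff s).mp hc h), if_pos (beq_iff_eq.mpr h)]
  · rw [if_pos ((pv_isIn_iff s).mpr h), if_neg (fun hc => h (beq_iff_eq.mp hc))]

-- A's per-name dict update, written with pvSplitName.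
def pvStepA (d : PySem.Dict String (List String)) (name : String) : PySem.Dict String (List String) :=
  let p := pvSplitName name
  if d.contains p.1 = false then d.insert p.1 [p.2]
  else if d.contains p.1 && !((d.getD p.1 []).contains p.2) then
    d.modify p.1 [] (fun l => l ++ [p.2])
  else d

-- The loop body of A (both copies) is pvStepA.
theorem pv_bodyA (d : PySem.Dict String (List String)) (key : String) :
    (let index := PySem.Str.find key " "
     let index := if PySem.Str.isIn " " (PySem.Str.slice key (some (index + 1)) none) then
         PySem.Str.findFrom key " " (index + 1) none else index
     let k_last := PySem.Str.slice key (some (index + 1)) none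
     let k_first := PySem.Str.slice key none (some index)
     if d.contains k_last = false then d.insert k_last [k_first]
     else if d.contains k_last && !((d.getD k_last []).contains k_first) then
       d.modify k_last [] (fun l => l ++ [k_first])
     else d)
    = pvStepA d key := by
  simp only [pvStepA, pvSplitName]
  rw [pv_cut_eq]

theorem pvStepA_keys (d : PySem.Dict String (List String)) (n : String) :
    (pvStepA d n).keys = PySem.Set.add d.keys (pvSplitName n).1 := by
  unfold pvStepA
  set p := pvSplitName n with hp
  by_cases hc : d.contains p.1 = false
  · rw [if_pos hc, PySem.Dict.keys_insert_of_not_contains d _ hc,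
      PySem.Set.add_of_not_mem]
    intro hm
    rw [← PySem.Dict.contains_iff_mem_keys] at hm
    simp [hc] at hm
  · have hmem : p.1 ∈ d.keys := by
      rw [← PySem.Dict.contains_iff_mem_keys]
      simpa using hc
    rw [if_neg hc]
    by_cases h2 : (d.contains p.1 && !((d.getD p.1 []).contains p.2)) = true
    · rw [if_pos h2, PySem.Dict.keys_modify,
        PySem.Dict.keys_insert_of_contains, PySem.Set.add_of_mem hmem]
      simpa using hc
    · rw [if_neg h2, PySem.Set.add_of_mem hmem]

theorem pvStepA_getD (d : PySem.Dict String (List String)) (n : String) (k : String) :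
    (pvStepA d n).getD k [] =
      if (pvSplitName n).1 = k then PySem.Set.add (d.getD k []) (pvSplitName n).2
      else d.getD k [] := by
  unfold pvStepA
  set p := pvSplitName n with hp
  by_cases hc : d.contains p.1 = false
  · rw [if_pos hc, PySem.Dict.getD_insert]
    by_cases hk : k = p.1
    · rw [if_pos hk, if_pos hk.symm, hk, PySem.Dict.getD_of_not_contains d [] hc,
        PySem.Set.add_of_not_mem (by simp)]
      rfl
    · rw [if_neg hk, if_neg (fun h => hk h.symm)]
  · rw [if_neg hc]
    have hct : d.contains p.1 = true := by simpa using hc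
    by_cases h2 : (d.contains p.1 && !((d.getD p.1 []).contains p.2)) = true
    · have hnm : p.2 ∉ d.getD p.1 [] := by
        simp [hct] at h2
        simpa using h2
      rw [if_pos h2, PySem.Dict.getD_modify]
      by_cases hk : k = p.1
      · rw [if_pos hk, if_pos hk.symm, hk, PySem.Set.add_of_not_mem hnm]
      · rw [if_neg hk, if_neg (fun h => hk h.symm)]
    · by_cases hk : p.1 = k
      · have hm : p.2 ∈ d.getD p.1 [] := by
          simp [hct] at h2
          simpa using h2
        rw [if_neg h2, if_pos hk, ← hk, PySem.Set.add_of_mem hm]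
      · rw [if_neg h2, if_neg hk]

theorem pvFoldA_keys (names : List String) (d : PySem.Dict String (List String)) :
    (names.foldl pvStepA d).keys =
      PySem.Set.update d.keys (names.map (fun n => (pvSplitName n).1)) := by
  induction names generalizing d with
  | nil => simp [PySem.Set.update_nil]
  | cons n names ih =>
    rw [List.foldl_cons, ih, pvStepA_keys, List.map_cons, PySem.Set.update_cons]

theorem pvFoldA_getD (names : List String) (d : PySem.Dict String (List String)) (k : String) :
    (names.foldl pvStepA d).getD k [] =
      PySem.Set.update (d.getD k [])
        ((names.filter (fun n => (pvSplitName n).1 == k)).map (fun n => (pvSplitName n).2)) := by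
  induction names generalizing d with
  | nil => simp [PySem.Set.update_nil]
  | cons n names ih =>
    rw [List.foldl_cons, ih, pvStepA_getD]
    by_cases h : (pvSplitName n).1 = k
    · simp [h, PySem.Set.update_cons]
    · simp [h]

-- The two loops of A, with their inline bodies replaced by pvStepA.
theorem pv_loopA1 (l : List (String × List String)) (d : PySem.Dict String (List String)) :
    l.foldl (fun d kv =>
      let key := kv.1
      let index := PySem.Str.find key " "
      let index := if PySem.Str.isIn " " (PySem.Str.slice key (some (index + 1)) none) then
          PySem.Str.findFrom key " " (index + 1) none else index
      let k_last := PySem.Str.slice key (some (index + 1)) none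
      let k_first := PySem.Str.slice key none (some index)
      if d.contains k_last = false then d.insert k_last [k_first]
      else if d.contains k_last && !((d.getD k_last []).contains k_first) then
        d.modify k_last [] (fun l => l ++ [k_first])
      else d) d
    = l.foldl (fun d kv => pvStepA d kv.1) d :=
  PySem.List.foldl_congr_mem _ _ _ _ (fun acc kv _ => pv_bodyA acc kv.1)

theorem pv_loopA2 (l : List (String × List String)) (d : PySem.Dict String (List String)) :
    l.foldl (fun d kv =>
      kv.2.foldl (fun d person =>
        let index := PySem.Str.find person " "
        let index := if PySem.Str.isIn " " (PySem.Str.slice person (some (index + 1)) none) then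
            PySem.Str.findFrom person " " (index + 1) none else index
        let v_last := PySem.Str.slice person (some (index + 1)) none
        let v_first := PySem.Str.slice person none (some index)
        if d.contains v_last = false then d.insert v_last [v_first]
        else if d.contains v_last && !((d.getD v_last []).contains v_first) then
          d.modify v_last [] (fun l => l ++ [v_first])
        else d) d) d
    = l.foldl (fun d kv => kv.2.foldl (fun d person => pvStepA d person) d) d :=
  PySem.List.foldl_congr_mem _ _ _ _ (fun _ _ _ =>
    PySem.List.foldl_congr_mem _ _ _ _ (fun a p _ => pv_bodyA a p))

theorem pv_A_eq (ptf : List (String × List String)) :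
    get_last_to_first ptf =
      ((ptf.map (fun kv => kv.1) ++ ptf.flatMap (fun kv => kv.2)).foldl pvStepA
        PySem.Dict.empty).items.map (fun kv => (kv.1, PySem.List.sorted kv.2 (fun x => x) false)) := by
  simp only [get_last_to_first]
  rw [pv_loopA1, pv_loopA2, List.foldl_append, List.foldl_flatMap, List.foldl_map]

theorem pv_B_eq (ptf : List (String × List String)) :
    get_last_to_first_alt ptf =
      (PySem.Set.ofList (((ptf.map (fun kv => kv.1) ++ ptf.flatMap (fun kv => kv.2)).map pvSplitName).map (fun p => p.1))).map
        (fun last =>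
          (last, PySem.List.sorted
            (PySem.Set.ofList (((((ptf.map (fun kv => kv.1) ++ ptf.flatMap (fun kv => kv.2)).map pvSplitName).filter (fun p => p.1 == last))).map (fun p => p.2)))
            (fun x => x) false)) := by
  simp only [get_last_to_first_alt]
  rw [PySem.List.foldl_append_eq_flatMap]

-- ===== VERDICT (by name: the statement is the Claim_ definition above) =====
theorem get_last_to_first_spec : Claim_equal_get_last_to_first := by
  intro ptf _ _
  show get_last_to_first ptf = get_last_to_first_alt ptf
  rw [pv_A_eq, pv_B_eq]
  set names := ptf.map (fun kv => kv.1) ++ ptf.flatMap (fun kv => kv.2) with hnames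
  set dA := names.foldl pvStepA PySem.Dict.empty with hdA
  have hkeysA : dA.keys = PySem.Set.ofList (names.map (fun n => (pvSplitName n).1)) := by
    rw [hdA, pvFoldA_keys, PySem.Dict.keys_empty, PySem.Set.update_nil_left]
  have hndA : dA.keys.Nodup := by rw [hkeysA]; exact PySem.Set.nodup_ofList _
  have hvals : ∀ k : String, dA.getD k [] =
      PySem.Set.ofList (((names.map pvSplitName).filter (fun p => p.1 == k)).map (fun p => p.2)) := by
    intro k
    rw [hdA, pvFoldA_getD, PySem.Dict.getD_empty, PySem.Set.update_nil_left,
      List.filter_map, List.map_map]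
    rfl
  rw [PySem.Dict.items_eq_map_keys dA hndA [], List.map_map, hkeysA, List.map_map]
  refine List.map_congr_left (fun k _ => ?_)
  simp only [Function.comp]
  rw [hvals k]
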